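-- pv_equiv track=rewrite | github.com/Duongsuny/StripPacking | OR_Tool_with_rotation.py | get_instances_from_c
-- ===== SOURCE A (Python) =====
-- def get_instances_from_c(level=None, start_level=None, end_level=None, instance=None):
--     """
--     Get list of instances from c folder based on parameters
--     """
--     instances = []
--     if level is not None:
--         for p in range(1, 4):
--             instances.append(f"C{level}P{p}")
--     elif start_level is not None and end_level is not None:
--         for l in range(start_level, end_level + 1):
--             for p in range(1, 4):
--                 instances.append(f"C{l}P{p}")
--     elif instance is not None:
--         instances.append(instance)
--     else:
--         for l in range(1, 8):
--             for p in range(1, 4):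
--                 instances.append(f"C{l}P{p}")
--     return instances
-- ===== SOURCE B (Python) =====
-- def get_instances_from_c(level=None, start_level=None, end_level=None, instance=None):
--     if level is not None:
--         lo, hi = level, level
--     elif start_level is not None and end_level is not None:
--         lo, hi = start_level, end_level
--     elif instance is not None:
--         return [instance]
--     else:
--         lo, hi = 1, 7
--     # flat index enumeration: name #i is level lo + i//3, part 1 + i%3
--     return [f"C{lo + i // 3}P{1 + i % 3}" for i in range(3 * (hi + 1 - lo))]
-- ===== Notes on version B (the rewrite author's own statement) =====
-- stated objective: alternative
-- what changed: Replaces A's nested level/part loops (three separate branch copies) by one flat comprehension over a single index i in range(3*(hi+1-lo)), recovering level and part by divmod arithmetic (lo + i//3, 1 + i%3); the level bounds come from one precedence chain and the raw-instance branch returns early.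
import Mathlib
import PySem

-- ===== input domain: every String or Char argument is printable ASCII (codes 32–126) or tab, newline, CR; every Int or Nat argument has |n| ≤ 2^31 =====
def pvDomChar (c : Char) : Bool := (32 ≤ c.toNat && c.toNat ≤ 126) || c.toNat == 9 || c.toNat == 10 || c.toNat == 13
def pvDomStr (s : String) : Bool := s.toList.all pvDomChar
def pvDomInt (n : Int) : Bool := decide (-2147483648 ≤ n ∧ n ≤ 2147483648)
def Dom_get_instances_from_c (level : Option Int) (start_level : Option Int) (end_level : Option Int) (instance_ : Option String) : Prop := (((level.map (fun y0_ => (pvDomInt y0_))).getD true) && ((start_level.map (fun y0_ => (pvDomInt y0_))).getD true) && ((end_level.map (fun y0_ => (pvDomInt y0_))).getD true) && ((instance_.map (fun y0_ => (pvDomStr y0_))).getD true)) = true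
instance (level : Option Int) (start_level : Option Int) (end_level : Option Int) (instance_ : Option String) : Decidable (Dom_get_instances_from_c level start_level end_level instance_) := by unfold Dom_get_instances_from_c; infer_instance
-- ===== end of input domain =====

-- B replaces A's nested level/part append-loops by one flat comprehension over a single
-- index, recovering level and part by divmod arithmetic (objective: alternative).

-- ===== PORT A =====
-- f"C{l}P{p}"
def cName (l p : Int) : String := "C" ++ PySem.Int.toStr l ++ "P" ++ PySem.Int.toStr p

def get_instances_from_c (level : Option Int) (start_level : Option Int) (end_level : Option Int) (instance_ : Option String) : List String :=
  match level with
  | some v =>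
      (PySem.List.pyRange 1 4 1).foldl (fun acc p => acc ++ [cName v p]) []
  | none =>
      match start_level, end_level with
      | some s, some e =>
          (PySem.List.pyRange s (e + 1) 1).foldl (fun acc l =>
            (PySem.List.pyRange 1 4 1).foldl (fun acc2 p => acc2 ++ [cName l p]) acc) []
      | _, _ =>
          match instance_ with
          | some i => [i]
          | none =>
              (PySem.List.pyRange 1 8 1).foldl (fun acc l =>
                (PySem.List.pyRange 1 4 1).foldl (fun acc2 p => acc2 ++ [cName l p]) acc) []

-- ===== PORT B =====
-- [f"C{lo + i // 3}P{1 + i % 3}" for i in range(3 * (hi + 1 - lo))]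
def cFlat (lo hi : Int) : List String :=
  (PySem.List.pyRange 0 (3 * (hi + 1 - lo)) 1).map
    (fun i => cName (lo + PySem.Int.floordiv i 3) (1 + PySem.Int.mod i 3))

-- the 'is not None' precedence chain deriving (lo, hi), with the raw-instance early return
def get_instances_from_c_alt (level : Option Int) (start_level : Option Int) (end_level : Option Int) (instance_ : Option String) : List String :=
  match level with
  | some v => cFlat v v
  | none =>
      if start_level.isSome && end_level.isSome then
        cFlat (start_level.getD 0) (end_level.getD 0)
      else
        match instance_ with
        | some i => [i]
        | none => cFlat 1 7

-- ===== PRECONDITION & SPEC =====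
def Spec_get_instances_from_c (level : Option Int) (start_level : Option Int) (end_level : Option Int) (instance_ : Option String) (out : List String) : Prop := out = get_instances_from_c_alt level start_level end_level instance_
instance (level : Option Int) (start_level : Option Int) (end_level : Option Int) (instance_ : Option String) (out : List String) : Decidable (Spec_get_instances_from_c level start_level end_level instance_ out) := by unfold Spec_get_instances_from_c; infer_instance

-- ===== CLAIM (what is proved, stated in full; the proofs are below) =====
def Claim_equal_get_instances_from_c : Prop := ∀ (level : Option Int) (start_level : Option Int) (end_level : Option Int) (instance_ : Option String), Dom_get_instances_from_c level start_level end_level instance_ → Spec_get_instances_from_c level start_level end_level instance_ (get_instances_from_c level start_level end_level instance_)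

-- ===== LEMMAS AND PROOFS =====

-- A's nested append-loop over l ∈ range(a,b), p ∈ 1..3 in flatMap form.
theorem nested_eq (a b : Int) :
    (PySem.List.pyRange a b 1).foldl (fun acc l =>
      (PySem.List.pyRange 1 4 1).foldl (fun acc2 p => acc2 ++ [cName l p]) acc) []
    = (PySem.List.pyRange a b 1).flatMap (fun l =>
        (PySem.List.pyRange 1 4 1).map (fun p => cName l p)) := by
  have h : ∀ (l : Int) (acc : List String),
      (PySem.List.pyRange 1 4 1).foldl (fun acc2 p => acc2 ++ [cName l p]) acc
      = acc ++ (PySem.List.pyRange 1 4 1).map (fun p => cName l p) := fun l acc =>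
    PySem.List.foldl_append_singleton_eq_map (f := fun p => cName l p) _ _
  calc (PySem.List.pyRange a b 1).foldl (fun acc l =>
        (PySem.List.pyRange 1 4 1).foldl (fun acc2 p => acc2 ++ [cName l p]) acc) []
      = (PySem.List.pyRange a b 1).foldl (fun acc l =>
          acc ++ (PySem.List.pyRange 1 4 1).map (fun p => cName l p)) [] :=
        List.foldl_ext _ _ _ fun acc l _ => h l acc
    _ = _ := by
        simpa using PySem.List.foldl_append_eq_flatMap
          (fun l => (PySem.List.pyRange 1 4 1).map (fun p => cName l p)) (PySem.List.pyRange a b 1) []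

-- shifting a unit-step range by d shifts its elements
theorem pyRange_shift (n : Nat) : ∀ (a d : Int),
    PySem.List.pyRange (a + d) (a + d + n) 1 = (PySem.List.pyRange a (a + n) 1).map (· + d) := by
  induction n with
  | zero => intro a d; simp [PySem.List.pyRange_one_eq_nil]
  | succ m ih =>
      intro a d
      rw [PySem.List.pyRange_one_cons (by omega), PySem.List.pyRange_one_cons (a := a) (by omega)]
      simp only [List.map_cons]
      congr 1
      calc PySem.List.pyRange (a + d + 1) (a + d + ((m : Int) + 1)) 1
          = PySem.List.pyRange ((a + 1) + d) ((a + 1) + d + m) 1 := by ring_nf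
        _ = (PySem.List.pyRange (a + 1) ((a + 1) + m) 1).map (· + d) := ih (a + 1) d
        _ = (PySem.List.pyRange (a + 1) (a + ((m : Int) + 1)) 1).map (· + d) := by ring_nf

-- divmod arithmetic: bumping the flat index by 3 bumps the level and keeps the part
theorem divmod_step (a i : Int) :
    cName (a + PySem.Int.floordiv (i + 3) 3) (1 + PySem.Int.mod (i + 3) 3)
    = cName ((a + 1) + PySem.Int.floordiv i 3) (1 + PySem.Int.mod i 3) := by
  have e1 := PySem.Int.floordiv_mul_add_mod (i + 3) 3
  have e2 := PySem.Int.floordiv_mul_add_mod i 3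
  have r1 := PySem.Int.mod_nonneg (a := i + 3) (b := 3) (by norm_num)
  have r2 := PySem.Int.mod_nonneg (a := i) (b := 3) (by norm_num)
  have l1 := PySem.Int.mod_lt (a := i + 3) (b := 3) (by norm_num)
  have l2 := PySem.Int.mod_lt (a := i) (b := 3) (by norm_num)
  have hq : PySem.Int.floordiv (i + 3) 3 = PySem.Int.floordiv i 3 + 1 := by omega
  have hr : PySem.Int.mod (i + 3) 3 = PySem.Int.mod i 3 := by omega
  rw [hq, hr]; ring_nf

-- the nested enumeration equals the flat divmod enumeration
theorem flat_eq (n : Nat) : ∀ (a : Int),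
    (PySem.List.pyRange a (a + n) 1).flatMap (fun l =>
      (PySem.List.pyRange 1 4 1).map (fun p => cName l p))
    = (PySem.List.pyRange 0 (3 * n) 1).map
        (fun i => cName (a + PySem.Int.floordiv i 3) (1 + PySem.Int.mod i 3)) := by
  induction n with
  | zero => intro a; simp [PySem.List.pyRange_one_eq_nil]
  | succ m ih =>
      intro a
      rw [PySem.List.pyRange_one_cons (a := a) (by omega), List.flatMap_cons]
      have hrest : (PySem.List.pyRange (a + 1) (a + ((m : Nat) + 1 : Nat)) 1).flatMap (fun l =>
            (PySem.List.pyRange 1 4 1).map (fun p => cName l p))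
          = (PySem.List.pyRange 0 (3 * m) 1).map
              (fun i => cName ((a + 1) + PySem.Int.floordiv i 3) (1 + PySem.Int.mod i 3)) := by
        have := ih (a + 1)
        have harg : a + 1 + ((m : Nat) : Int) = a + (((m : Nat) + 1 : Nat) : Int) := by push_cast; ring
        rwa [harg] at this
      rw [hrest]
      have hsplit : PySem.List.pyRange 0 (3 * (((m : Nat) + 1 : Nat) : Int)) 1
          = PySem.List.pyRange 0 3 1 ++ PySem.List.pyRange 3 (3 * (((m : Nat) + 1 : Nat) : Int)) 1 :=
        PySem.List.pyRange_one_append 0 3 _ (by omega) (by push_cast; omega)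
      rw [hsplit, List.map_append]
      have hshift : PySem.List.pyRange 3 (3 * (((m : Nat) + 1 : Nat) : Int)) 1
          = (PySem.List.pyRange 0 (3 * m) 1).map (· + 3) := by
        calc PySem.List.pyRange 3 (3 * (((m : Nat) + 1 : Nat) : Int)) 1
            = PySem.List.pyRange (0 + 3) ((0 : Int) + 3 + ((3 * m : Nat) : Int)) 1 := by push_cast; ring_nf
          _ = (PySem.List.pyRange 0 ((0 : Int) + ((3 * m : Nat) : Int)) 1).map (· + 3) := pyRange_shift (3 * m) 0 3
          _ = (PySem.List.pyRange 0 (3 * m) 1).map (· + 3) := by push_cast; ring_nf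
      rw [hshift, List.map_map]
      congr 1
      · have h14 : PySem.List.pyRange 1 4 1 = [1, 2, 3] := by decide
        have h03 : PySem.List.pyRange 0 3 1 = [0, 1, 2] := by decide
        rw [h14, h03]
        simp only [List.map_cons, List.map_nil,
          show PySem.Int.floordiv 0 3 = 0 from by decide, show PySem.Int.mod 0 3 = 0 from by decide,
          show PySem.Int.floordiv 1 3 = 0 from by decide, show PySem.Int.mod 1 3 = 1 from by decide,
          show PySem.Int.floordiv 2 3 = 0 from by decide, show PySem.Int.mod 2 3 = 2 from by decide]
        norm_num
      · exact List.map_congr_left fun i _ => (divmod_step a i).symm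

-- each nested-loop branch of A equals B's flat block over the matching bounds
theorem main_eq (a b : Int) :
    (PySem.List.pyRange a b 1).foldl (fun acc l =>
      (PySem.List.pyRange 1 4 1).foldl (fun acc2 p => acc2 ++ [cName l p]) acc) []
    = cFlat a (b - 1) := by
  rw [nested_eq]
  by_cases hab : a ≤ b
  · obtain ⟨n, hn⟩ : ∃ n : Nat, b = a + (n : Int) := ⟨(b - a).toNat, by omega⟩
    subst hn
    rw [cFlat, show a + (n : Int) - 1 + 1 - a = (n : Int) by ring]
    exact flat_eq n a
  · have h1 : PySem.List.pyRange a b 1 = [] := PySem.List.pyRange_one_eq_nil (by omega)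
    have h2 : PySem.List.pyRange 0 (3 * (b - 1 + 1 - a)) 1 = [] :=
      PySem.List.pyRange_one_eq_nil (by omega)
    rw [cFlat, h1, h2]
    simp

-- ===== VERDICT (by name: the statement is the Claim_ definition above) =====
theorem get_instances_from_c_spec : Claim_equal_get_instances_from_c := by
  intro level start_level end_level instance_ _
  rcases level with _ | v
  · rcases start_level with _ | s <;> rcases end_level with _ | e <;>
      rcases instance_ with _ | i <;>
      simp only [Spec_get_instances_from_c, get_instances_from_c, get_instances_from_c_alt,
        Option.isSome, Option.getD, Bool.and_self, Bool.and_false, Bool.false_and] <;>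
      first
        | rfl
        | (have := main_eq s (e + 1); simpa using this)
  · simp only [Spec_get_instances_from_c, get_instances_from_c, get_instances_from_c_alt]
    have := main_eq v (v + 1)
    simpa using this
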